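-- pv_equiv track=rewrite | github.com/jeffsmith8/Ros_Study | Bioinformatics_Stronghold/Bioinformatics Stronghold.py | tree_missing_nodes
-- ===== SOURCE A (Python) =====
-- def tree_missing_nodes(list):
--     merged_list = []
--     for i in range(1,len(list)):
--         merged_list+=(list[i])
--
--     missing_nodes=[]
--     for i in range(1,1+list[0][0]):
--         if i not in merged_list:
--             missing_nodes.append(i)
--     return missing_nodes
-- ===== SOURCE B (Python) =====
-- def tree_missing_nodes(list):
--     n = list[0][0]
--     labels = sorted({x for edge in list[1:] for x in edge if 1 <= x <= n})
--     missing = []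
--     prev = 0
--     for p in labels:
--         missing.extend(range(prev + 1, p))
--         prev = p
--     missing.extend(range(prev + 1, n + 1))
--     return missing
-- ===== Notes on version B (the rewrite author's own statement) =====
-- stated objective: faster
-- what changed: Replaces A's per-candidate membership scan of 1..n against the concatenated edge list by sorting the distinct in-range labels once and emitting the missing numbers as the gaps between consecutive sorted labels (no membership test at all).
import Mathlib
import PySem

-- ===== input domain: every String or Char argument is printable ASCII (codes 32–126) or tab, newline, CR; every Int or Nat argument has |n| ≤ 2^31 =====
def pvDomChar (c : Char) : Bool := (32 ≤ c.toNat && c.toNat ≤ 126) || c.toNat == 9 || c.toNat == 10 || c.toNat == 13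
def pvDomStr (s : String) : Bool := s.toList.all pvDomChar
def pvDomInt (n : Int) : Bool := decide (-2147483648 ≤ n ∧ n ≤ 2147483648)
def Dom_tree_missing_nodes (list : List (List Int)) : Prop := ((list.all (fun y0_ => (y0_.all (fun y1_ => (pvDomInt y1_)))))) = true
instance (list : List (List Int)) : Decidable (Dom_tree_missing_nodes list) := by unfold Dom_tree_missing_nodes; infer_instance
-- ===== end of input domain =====

-- B sorts the distinct in-range labels once and emits the missing numbers as the gaps
-- between consecutive sorted labels, instead of A's per-candidate membership scan (faster).

-- ===== PORT A =====
def tree_missing_nodes (list : List (List Int)) : List Int :=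
  let merged := (PySem.List.pyRange 1 (list.length : Int) 1).foldl
      (fun acc i => acc ++ PySem.List.pyGetD list i []) []
  let n := PySem.List.pyGetD (PySem.List.pyGetD list 0 []) 0 0
  (PySem.List.pyRange 1 (1 + n) 1).foldl
      (fun acc i => if i ∈ merged then acc else acc ++ [i]) []

-- ===== PORT B =====
-- B's for-loop over the sorted labels with the `prev` accumulator, emitting each gap.
def tmnGaps (prev n : Int) (ps : List Int) : List Int :=
  match ps with
  | [] => PySem.List.pyRange (prev + 1) (n + 1) 1
  | p :: t => PySem.List.pyRange (prev + 1) p 1 ++ tmnGaps p n t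

def tree_missing_nodes_alt (list : List (List Int)) : List Int :=
  let n := PySem.List.pyGetD (PySem.List.pyGetD list 0 []) 0 0
  let labels := PySem.List.sorted
      (PySem.Set.ofList ((PySem.List.slice list (some 1) none).flatten.filter
        (fun x => decide (1 ≤ x ∧ x ≤ n))))
      (fun x => x) false
  tmnGaps 0 n labels

-- ===== PRECONDITION & SPEC =====
-- Pre_ excludes exactly the inputs where A raises IndexError (list[0][0]): an empty
-- list or an empty first sublist; B raises there as well.
def Pre_tree_missing_nodes (list : List (List Int)) : Prop :=
  list ≠ [] ∧ list.headD [] ≠ []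
instance (list : List (List Int)) : Decidable (Pre_tree_missing_nodes list) := by
  unfold Pre_tree_missing_nodes; infer_instance

def pvWitness_tree_missing_nodes : List (List Int) := [[3], [1, 2]]

def Spec_tree_missing_nodes (list : List (List Int)) (out : List Int) : Prop := out = tree_missing_nodes_alt list
instance (list : List (List Int)) (out : List Int) : Decidable (Spec_tree_missing_nodes list out) := by unfold Spec_tree_missing_nodes; infer_instance

-- ===== CLAIM (what is proved, stated in full; the proofs are below) =====
def Claim_equal_tree_missing_nodes : Prop := ∀ (list : List (List Int)), Dom_tree_missing_nodes list → Pre_tree_missing_nodes list → Spec_tree_missing_nodes list (tree_missing_nodes list)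

-- ===== LEMMAS AND PROOFS =====

-- A's merge loop: concatenating the tail's sublists is flatten.
theorem foldl_append_eq_flatten_ (l : List (List Int)) (acc : List Int) :
    l.foldl (fun a e => a ++ e) acc = acc ++ l.flatten := by
  induction l generalizing acc with
  | nil => simp
  | cons e t ih => simp [List.foldl_cons, ih, List.append_assoc]

-- A's second loop is a filter.
theorem foldl_if_not_mem_eq_filter_ (m : List Int) (l : List Int) (acc : List Int) :
    l.foldl (fun acc i => if i ∈ m then acc else acc ++ [i]) acc
      = acc ++ l.filter (fun i => decide (i ∉ m)) := by
  induction l generalizing acc with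
  | nil => simp
  | cons x t ih =>
    by_cases hx : x ∈ m <;> simp [List.foldl_cons, ih, hx, List.append_assoc]

-- The gap scan over a strictly increasing list of present labels in (prev, n]
-- produces exactly the numbers of (prev, n] not among the labels.
theorem tmnGaps_eq_filter_ (n : Int) (ps : List Int) : ∀ prev,
    ps.Pairwise (· < ·) → (∀ x ∈ ps, prev < x ∧ x ≤ n) →
    tmnGaps prev n ps
      = (PySem.List.pyRange (prev + 1) (n + 1) 1).filter (fun i => decide (i ∉ ps)) := by
  induction ps with
  | nil => intro prev _ _; simp [tmnGaps]
  | cons p t ih =>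
    intro prev hpw hb
    obtain ⟨hp1, hp2⟩ := hb p (List.mem_cons_self)
    have hpt : ∀ x ∈ t, p < x := (List.pairwise_cons.mp hpw).1
    rw [tmnGaps,
      PySem.List.pyRange_one_append (prev + 1) p (n + 1) (by omega) (by omega),
      List.filter_append,
      PySem.List.pyRange_one_cons (by omega : p < n + 1)]
    congr 1
    · -- every element of (prev, p) is below every label, hence kept
      refine (List.filter_eq_self.mpr ?_).symm
      intro x hx
      rw [PySem.List.mem_pyRange_one] at hx
      simp only [decide_eq_true_eq, List.mem_cons]
      rintro (rfl | hxt)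
      · omega
      · exact absurd hx.2 (by have := hpt x hxt; omega)
    · -- p itself is dropped, and above p membership in p :: t is membership in t
      rw [List.filter_cons_of_neg (by simp)]
      have hcongr : ∀ x ∈ PySem.List.pyRange (p + 1) (n + 1) 1,
          (decide (x ∉ p :: t)) = (decide (x ∉ t)) := by
        intro x hx
        rw [PySem.List.mem_pyRange_one] at hx
        simp only [List.mem_cons, decide_eq_decide]
        constructor
        · intro h hxt; exact h (Or.inr hxt)
        · rintro h (rfl | hxt)
          · omega
          · exact h hxt
      rw [List.filter_congr hcongr,
        ih p (List.pairwise_cons.mp hpw).2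
          (fun x hx => ⟨hpt x hx, (hb x (List.mem_cons_of_mem _ hx)).2⟩)]

theorem tree_missing_nodes_spec : Claim_equal_tree_missing_nodes := by
  intro list _hdom hpre
  unfold Spec_tree_missing_nodes
  obtain ⟨hne, hhd⟩ := hpre
  cases list with
  | nil => exact absurd rfl hne
  | cons h t =>
    simp only [List.headD_cons] at hhd
    unfold tree_missing_nodes tree_missing_nodes_alt
    rw [PySem.List.foldl_pyRange_pyGetD' (a := 1) (h :: t) ([] : List Int)
      (fun a e => a ++ e) [] (by norm_num)]
    simp only [PySem.List.slice_from_one, List.tail_cons]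
    rw [foldl_append_eq_flatten_, foldl_if_not_mem_eq_filter_]
    simp only [List.nil_append]
    set n := PySem.List.pyGetD (PySem.List.pyGetD (h :: t) 0 []) 0 0 with hn
    set labels := PySem.List.sorted
      (PySem.Set.ofList (t.flatten.filter (fun x => decide (1 ≤ x ∧ x ≤ n))))
      (fun x => x) false with hl
    rw [show (1 + n) = (n + 1) by ring, show (1 : Int) = 0 + 1 by ring,
      tmnGaps_eq_filter_ n labels 0 (by rw [hl]; exact PySem.List.sorted_ofList_pairwise_lt _) ?_]
    · -- the two filters agree on every element of the range
      refine List.filter_congr ?_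
      intro x hx
      rw [show (0 : Int) + 1 = 1 by ring, PySem.List.mem_pyRange_one] at hx
      simp only [decide_eq_decide, hl, PySem.List.mem_sorted, PySem.Set.mem_ofList,
        List.mem_filter, decide_eq_true_eq]
      constructor
      · intro hm ⟨hm', _⟩; exact hm hm'
      · intro hm hmf; exact hm ⟨hmf, by omega⟩
    · intro x hx
      rw [hl, PySem.List.mem_sorted, PySem.Set.mem_ofList, List.mem_filter] at hx
      have := hx.2
      simp only [decide_eq_true_eq] at this
      omega
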